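-- pv_equiv track=rewrite | github.com/Liza-O/Matrices | main.py | maxInColumns
-- ===== SOURCE A (Python) =====
-- def maxInColumns(matrix):
--     num_cols = len(matrix[0])
--     max_values = []
--     for j in range(num_cols):
--         col_max = float('-inf')
--         for i in range(len(matrix)):
--             if matrix[i][j]>col_max:
--                 col_max = matrix[i][j]
--         max_values.append(col_max)
--     return max_values
-- ===== SOURCE B (Python) =====
-- def maxInColumns(matrix):
--     max_values = list(matrix[0])
--     for row in matrix[1:]:
--         for j in range(len(max_values)):
--             if row[j] > max_values[j]:
--                 max_values[j] = row[j]
--     return max_values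
-- ===== Notes on version B (the rewrite author's own statement) =====
-- stated objective: alternative
-- what changed: One row-major pass that seeds the result with the first row and updates a vector of running column maxima in place, instead of A's per-column re-scan of the whole matrix with a scalar accumulator and a -inf sentinel.
import Mathlib
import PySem

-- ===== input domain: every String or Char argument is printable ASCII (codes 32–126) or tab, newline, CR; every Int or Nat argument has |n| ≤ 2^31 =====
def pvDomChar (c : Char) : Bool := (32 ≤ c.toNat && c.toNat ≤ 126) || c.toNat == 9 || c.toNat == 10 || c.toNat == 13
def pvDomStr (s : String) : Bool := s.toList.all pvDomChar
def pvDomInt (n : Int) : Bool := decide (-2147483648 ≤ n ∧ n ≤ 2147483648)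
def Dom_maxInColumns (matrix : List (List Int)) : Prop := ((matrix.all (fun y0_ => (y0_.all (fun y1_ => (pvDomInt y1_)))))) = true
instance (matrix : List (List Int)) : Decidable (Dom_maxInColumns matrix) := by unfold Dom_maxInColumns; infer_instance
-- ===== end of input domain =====

-- B replaces A's per-column re-scan (scalar accumulator, -inf sentinel) by one row-major pass
-- updating a vector of running column maxima seeded from the first row (alternative decomposition).


-- ===== PORT A =====
-- col_max = float('-inf') is modelled as `none` (Option Int); under Pre_ the matrix is
-- nonempty so the inner loop always replaces it and `.getD 0` never supplies the default.
-- matrix[0] and matrix[i][j] are pyGetD with a default, exact under Pre_ (all indices in range).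
def maxInColumns (matrix : List (List Int)) : List Int :=
  let numCols : Int := ((matrix.getD 0 []).length : Int)   -- len(matrix[0]); Pre_ gives matrix ≠ []
  (PySem.List.pyRange 0 numCols 1).foldl (fun maxValues j =>
    let colMax : Option Int :=
      (PySem.List.pyRange 0 (matrix.length : Int) 1).foldl (fun colMax i =>
        let v := PySem.List.pyGetD (PySem.List.pyGetD matrix i []) j 0
        match colMax with
        | none => some v                                  -- v > -inf always
        | some c => if v > c then some v else some c) none
    maxValues ++ [colMax.getD 0]) []

-- ===== PORT B =====
-- max_values = list(matrix[0]); matrix[1:] is drop 1; in-place mv[j] = v is pySetD.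
def maxInColumns_alt (matrix : List (List Int)) : List Int :=
  let init := matrix.getD 0 []                             -- list(matrix[0]); Pre_ gives matrix ≠ []
  (matrix.drop 1).foldl (fun mv row =>
    (PySem.List.pyRange 0 (mv.length : Int) 1).foldl (fun mv j =>
      if PySem.List.pyGetD row j 0 > PySem.List.pyGetD mv j 0 then
        PySem.List.pySetD mv j (PySem.List.pyGetD row j 0)
      else mv) mv) init

-- ===== PRECONDITION & SPEC =====
-- Pre_ excludes exactly the inputs where Python A raises IndexError: the empty matrix
-- (matrix[0]) and ragged matrices with a row shorter than the first row (matrix[i][j]).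
def Pre_maxInColumns (matrix : List (List Int)) : Prop :=
  matrix ≠ [] ∧ ∀ row ∈ matrix, (matrix.getD 0 []).length ≤ row.length
instance (matrix : List (List Int)) : Decidable (Pre_maxInColumns matrix) := by
  unfold Pre_maxInColumns; infer_instance

def pvWitness_maxInColumns : List (List Int) := [[1, -2, 3], [4, 0, -5]]

def Spec_maxInColumns (matrix : List (List Int)) (out : List Int) : Prop := out = maxInColumns_alt matrix
instance (matrix : List (List Int)) (out : List Int) : Decidable (Spec_maxInColumns matrix out) := by unfold Spec_maxInColumns; infer_instance

-- ===== CLAIM (what is proved, stated in full; the proofs are below) =====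
def Claim_equal_maxInColumns : Prop := ∀ (matrix : List (List Int)), Dom_maxInColumns matrix → Pre_maxInColumns matrix → Spec_maxInColumns matrix (maxInColumns matrix)

-- ===== LEMMAS AND PROOFS =====

-- the scalar comparison step on column j, fed one row
def pvStep (j : Nat) (c : Int) (row : List Int) : Int :=
  if row.getD j 0 > c then row.getD j 0 else c

-- maximum of column j: first row seeds, remaining rows fold
def pvColMax (r0 : List Int) (rest : List (List Int)) (j : Nat) : Int :=
  rest.foldl (pvStep j) (r0.getD j 0)

-- a list is the map of its getD over its index range
theorem pvMapGetD {α : Type} (xs : List α) (d : α) :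
    (List.range xs.length).map (fun j => xs.getD j d) = xs := by
  apply List.ext_getElem (by simp)
  intro i h1 h2
  simp [List.getD_eq_getElem?_getD, List.getElem?_eq_getElem h2]

-- an index-reading fold over range is a fold over the list
theorem pvFoldIdx {α β : Type} (xs : List α) (d : α) (g : β → α → β) (init : β) :
    (List.range xs.length).foldl (fun acc i => g acc (xs.getD i d)) init = xs.foldl g init := by
  conv_rhs => rw [← pvMapGetD xs d]
  rw [List.foldl_map]

-- A's inner Option fold, once seeded with `some c`, is the plain pvStep fold
theorem pvOptFold (j : Nat) (rest : List (List Int)) : ∀ c : Int,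
    rest.foldl (fun cm row =>
      match cm with
      | none => some (row.getD j 0)
      | some c => if row.getD j 0 > c then some (row.getD j 0) else some c)
      (some c)
    = some (rest.foldl (pvStep j) c) := by
  induction rest with
  | nil => intro c; rfl
  | cons r rs ih =>
      intro c
      simp only [List.foldl_cons, pvStep]
      split_ifs <;> exact ih _

-- A computes the map of pvColMax over the column indices
theorem pvA_eq (r0 : List Int) (rest : List (List Int)) :
    maxInColumns (r0 :: rest) = (List.range r0.length).map (pvColMax r0 rest) := by
  simp only [maxInColumns, List.getD_cons_zero, PySem.List.foldl_append_singleton_eq_map,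
    List.nil_append, PySem.List.pyRange_zero_nat, List.map_map]
  refine List.map_congr_left (fun k hk => ?_)
  rw [Function.comp_apply, List.foldl_map]
  simp only [PySem.List.pyGetD_natCast]
  rw [pvFoldIdx (r0 :: rest) ([] : List Int)
      (fun cm row =>
        match cm with
        | none => some (row.getD k 0)
        | some c => if row.getD k 0 > c then some (row.getD k 0) else some c) none]
  rw [List.foldl_cons]
  show (List.foldl _ (some (r0.getD k 0)) rest).getD 0 = _
  rw [pvOptFold]
  rfl

-- B's inner per-row fold (Nat-index form) updates every position independently
theorem pvInner (row mv : List Int) : ∀ k : Nat, k ≤ mv.length →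
    (List.range k).foldl (fun mv j =>
        if row.getD j 0 > mv.getD j 0 then mv.set j (row.getD j 0) else mv) mv
    = (List.range k).map (fun j => pvStep j (mv.getD j 0) row) ++ mv.drop k := by
  intro k
  induction k with
  | zero => intro _; simp
  | succ k ih =>
      intro hk
      have hk' : k < mv.length := hk
      rw [List.range_succ, List.foldl_append, List.foldl_cons, List.foldl_nil, ih (le_of_lt hk')]
      have hlen : ((List.range k).map (fun j => pvStep j (mv.getD j 0) row)).length = k := by simp
      have hget : ((List.range k).map (fun j => pvStep j (mv.getD j 0) row) ++ mv.drop k).getD k 0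
          = mv.getD k 0 := by
        rw [List.getD_eq_getElem?_getD, List.getElem?_append_right (by omega),
          hlen, Nat.sub_self, List.getElem?_drop, Nat.add_zero, ← List.getD_eq_getElem?_getD]
      rw [hget, List.map_append, List.map_singleton, List.append_assoc]
      by_cases h : row.getD k 0 > mv.getD k 0
      · rw [if_pos h, List.set_append_right _ _ (by omega), hlen, Nat.sub_self,
          List.drop_eq_getElem_cons hk', List.set_cons_zero]
        have hs : pvStep k (mv.getD k 0) row = row.getD k 0 := by
          unfold pvStep; rw [if_pos h]
        rw [hs]
        simp
      · rw [if_neg h]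
        have hs : pvStep k (mv.getD k 0) row = mv.getD k 0 := by
          unfold pvStep; rw [if_neg h]
        rw [hs, List.drop_eq_getElem_cons hk']
        simp [List.getD_eq_getElem?_getD, List.getElem?_eq_getElem hk']




-- B's outer fold over the remaining rows, columnwise
theorem pvB_fold (rest : List (List Int)) : ∀ mv : List Int,
    rest.foldl (fun mv row =>
      (PySem.List.pyRange 0 (mv.length : Int) 1).foldl (fun mv j =>
        if PySem.List.pyGetD row j 0 > PySem.List.pyGetD mv j 0 then
          PySem.List.pySetD mv j (PySem.List.pyGetD row j 0)
        else mv) mv) mv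
    = (List.range mv.length).map (fun j => rest.foldl (pvStep j) (mv.getD j 0)) := by
  induction rest with
  | nil => intro mv; simp only [List.foldl_nil]; exact (pvMapGetD mv 0).symm
  | cons r rs ih =>
      intro mv
      rw [List.foldl_cons]
      have hin : (PySem.List.pyRange 0 (mv.length : Int) 1).foldl (fun mv j =>
          if PySem.List.pyGetD r j 0 > PySem.List.pyGetD mv j 0 then
            PySem.List.pySetD mv j (PySem.List.pyGetD r j 0)
          else mv) mv
          = (List.range mv.length).map (fun j => pvStep j (mv.getD j 0) r) := by
        rw [PySem.List.pyRange_zero_nat, List.foldl_map]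
        simp only [PySem.List.pyGetD_natCast, PySem.List.pySetD_natCast]
        rw [pvInner r mv mv.length (le_refl _), List.drop_length, List.append_nil]
      rw [hin, ih]
      simp only [List.length_map, List.length_range]
      refine List.map_congr_left (fun k hk => ?_)
      have hk' : k < mv.length := List.mem_range.mp hk
      have : ((List.range mv.length).map (fun j => pvStep j (mv.getD j 0) r)).getD k 0
          = pvStep k (mv.getD k 0) r := by
        rw [List.getD_eq_getElem?_getD, List.getElem?_map, List.getElem?_range hk']
        rfl
      rw [this, List.foldl_cons]

theorem pvB_eq (r0 : List Int) (rest : List (List Int)) :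
    maxInColumns_alt (r0 :: rest) = (List.range r0.length).map (pvColMax r0 rest) := by
  simp only [maxInColumns_alt, List.getD_cons_zero, List.drop_succ_cons, List.drop_zero]
  exact pvB_fold rest r0

-- ===== VERDICT (by name: the statement is the Claim_ definition above) =====
theorem maxInColumns_spec : Claim_equal_maxInColumns := by
  intro matrix _ hpre
  unfold Spec_maxInColumns
  obtain ⟨hne, _⟩ := hpre
  cases matrix with
  | nil => exact absurd rfl hne
  | cons r0 rest => rw [pvA_eq, pvB_eq]
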